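-- pv_equiv track=rewrite | github.com/Ascarik/Checkio | Scientific_Expedition/8.py | caps_lock
-- ===== SOURCE A (Python) =====
-- def caps_lock(text: str) -> str:
--     # your code here
--     result = ""
--     flag = False
--     for index, ch in enumerate(text):
--         if flag:
--             if ch != 'a' and ch != 'A':
--                 result += ch.upper()
--                 continue
--             else:
--                 flag = False
--                 continue
--         if ch != 'a' and ch != 'A' or index == 0:
--             result += ch
--         else:
--             flag = True
--     return result
-- ===== SOURCE B (Python) =====
-- def caps_lock(text: str) -> str:
--     # Tokenize on the caps-toggle letters instead of running a char-by-char state machine: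
--     # keep the first character literally (A never toggles on it), split the rest on 'a'/'A',
--     # and uppercase every odd-indexed segment.
--     if not text:
--         return ""
--     segs = text[1:].replace('A', 'a').split('a')
--     parts = [text[0], segs[0]]
--     for i in range(1, len(segs)):
--         parts.append(segs[i].upper() if i % 2 == 1 else segs[i])
--     return ''.join(parts)
-- ===== Notes on version B (the rewrite author's own statement) =====
-- stated objective: faster
-- what changed: Replaced the char-by-char caps-flag state machine (building the result one character at a time) with a tokenize-then-alternate pass: keep the first character literally, split the rest on the toggle letter (after case-folding), uppercase every odd-indexed segment and join; the bulk str operations run in C instead of a Python-level per-character loop.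
import Mathlib
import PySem

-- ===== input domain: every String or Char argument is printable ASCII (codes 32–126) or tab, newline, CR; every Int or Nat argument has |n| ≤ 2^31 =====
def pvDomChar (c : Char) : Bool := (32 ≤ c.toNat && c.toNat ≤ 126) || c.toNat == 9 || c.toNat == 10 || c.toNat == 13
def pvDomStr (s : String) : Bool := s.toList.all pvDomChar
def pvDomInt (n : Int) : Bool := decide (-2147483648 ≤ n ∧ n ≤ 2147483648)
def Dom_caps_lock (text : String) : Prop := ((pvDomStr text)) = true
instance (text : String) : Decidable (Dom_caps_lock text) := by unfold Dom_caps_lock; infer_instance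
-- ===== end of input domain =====

-- B replaces A's char-by-char caps-state machine with a tokenize-then-alternate pass
-- (keep the first char, split the rest on 'a'/'A', uppercase odd-indexed segments); objective: simpler.

-- ===== PORT A =====
-- A's loop body: state (result, flag), element (index, ch).
def capsStep (st : List Char × Bool) (p : Int × Char) : List Char × Bool :=
  if st.2 then
    if p.2 ≠ 'a' ∧ p.2 ≠ 'A' then (st.1 ++ [PySem.Chars.upperChar p.2], true)
    else (st.1, false)
  else
    if (p.2 ≠ 'a' ∧ p.2 ≠ 'A') ∨ p.1 = 0 then (st.1 ++ [p.2], st.2)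
    else (st.1, true)

def caps_lock (text : String) : String :=
  String.mk ((PySem.List.enumerate text.toList 0).foldl capsStep ([], false)).1

-- ===== PORT B =====
-- B's loop body: append the segment, uppercased when its index is odd.
def altSegStep (acc : List (List Char)) (p : Int × List Char) : List (List Char) :=
  acc ++ [if PySem.Int.mod p.1 2 = 1 then PySem.Chars.upper p.2 else p.2]

def caps_lock_alt (text : String) : String :=
  match text.toList with
  | [] => ""
  | c :: rest =>
    -- segs = text[1:].replace('A','a').split('a')  (single-char replace/split, ported elementwise)
    let segs := (rest.map (fun ch => if ch = 'A' then 'a' else ch)).splitOn 'a'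
    let parts := (PySem.List.enumerate (PySem.List.slice segs (some 1) none) 1).foldl
        altSegStep [[c], PySem.List.pyGetD segs 0 []]
    String.mk parts.flatten

-- ===== PRECONDITION & SPEC =====
def Spec_caps_lock (text : String) (out : String) : Prop := out = caps_lock_alt text
instance (text : String) (out : String) : Decidable (Spec_caps_lock text out) := by unfold Spec_caps_lock; infer_instance

-- ===== CLAIM (what is proved, stated in full; the proofs are below) =====
def Claim_equal_caps_lock : Prop := ∀ (text : String), Dom_caps_lock text → Spec_caps_lock text (caps_lock text)

-- ===== LEMMAS AND PROOFS =====

-- The common reference machine: flag = caps on; toggle chars are consumed.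
def mach : Bool → List Char → List Char
  | _, [] => []
  | false, c :: cs => if c = 'a' ∨ c = 'A' then mach true cs else c :: mach false cs
  | true,  c :: cs => if c = 'a' ∨ c = 'A' then mach false cs else PySem.Chars.upperChar c :: mach true cs

-- B's alternation over the segment list.
def bAlt : Bool → List (List Char) → List Char
  | _, [] => []
  | f, seg :: rest => (if f then PySem.Chars.upper seg else seg) ++ bAlt (!f) rest

theorem lemmaA (cs : List Char) : ∀ (s : Int) (acc : List Char) (f : Bool), 1 ≤ s →
    ((PySem.List.enumerate cs s).foldl capsStep (acc, f)).1 = acc ++ mach f cs := by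
  induction cs with
  | nil => intro s acc f _; simp [PySem.List.enumerate, mach]
  | cons c cs ih =>
    intro s acc f hs
    have hs0 : s ≠ 0 := by omega
    rw [PySem.List.enumerate_cons, List.foldl_cons]
    cases f
    · by_cases hc : c = 'a' ∨ c = 'A'
      · have hstep : capsStep (acc, false) (s, c) = (acc, true) := by
          rcases hc with rfl | rfl <;> simp [capsStep, hs0]
        rw [hstep, ih (s+1) acc true (by omega)]
        conv_rhs => rw [mach]
        rw [if_pos hc]
      · have hc1 : c ≠ 'a' := by tauto
        have hc2 : c ≠ 'A' := by tauto
        have hstep : capsStep (acc, false) (s, c) = (acc ++ [c], false) := by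
          simp [capsStep, hc1, hc2]
        rw [hstep, ih (s+1) _ false (by omega)]
        conv_rhs => rw [mach]
        rw [if_neg hc]
        simp
    · by_cases hc : c = 'a' ∨ c = 'A'
      · have hstep : capsStep (acc, true) (s, c) = (acc, false) := by
          rcases hc with rfl | rfl <;> simp [capsStep]
        rw [hstep, ih (s+1) acc false (by omega)]
        conv_rhs => rw [mach]
        rw [if_pos hc]
      · have hc1 : c ≠ 'a' := by tauto
        have hc2 : c ≠ 'A' := by tauto
        have hstep : capsStep (acc, true) (s, c) = (acc ++ [PySem.Chars.upperChar c], true) := by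
          simp [capsStep, hc1, hc2]
        rw [hstep, ih (s+1) _ true (by omega)]
        conv_rhs => rw [mach]
        rw [if_neg hc]
        simp

theorem lemmaFold (rest : List (List Char)) : ∀ (s : Int) (acc : List (List Char)), 0 ≤ s →
    ((PySem.List.enumerate rest s).foldl altSegStep acc).flatten
      = acc.flatten ++ bAlt (PySem.Int.mod s 2 = 1) rest := by
  induction rest with
  | nil => intro s acc _; simp [PySem.List.enumerate, bAlt]
  | cons seg rest ih =>
    intro s acc hs
    rw [PySem.List.enumerate_cons, List.foldl_cons, ih (s+1) _ (by omega)]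
    have h2 : PySem.Int.mod s 2 = s % 2 := PySem.Int.mod_eq_emod_of_pos (by omega)
    have h2' : PySem.Int.mod (s+1) 2 = (s+1) % 2 := PySem.Int.mod_eq_emod_of_pos (by omega)
    by_cases hp : s % 2 = 1
    · have : (s+1) % 2 = 0 := by omega
      simp [altSegStep, bAlt, hp, this]
    · have : (s+1) % 2 = 1 := by omega
      simp [altSegStep, bAlt, hp, this]

theorem lemmaB (cs : List Char) : ∀ (f : Bool),
    bAlt f ((cs.map (fun ch => if ch = 'A' then 'a' else ch)).splitOn 'a') = mach f cs := by
  induction cs with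
  | nil => intro f; cases f <;> simp [List.splitOn, List.splitOnP_nil, bAlt, mach, PySem.Chars.upper]
  | cons c cs ih =>
    intro f
    by_cases hc : c = 'a' ∨ c = 'A'
    · have : (if c = 'A' then 'a' else c) = 'a' := by rcases hc with h | h <;> simp [h]
      have ih' : ∀ f, bAlt f ((cs.map (fun ch => if ch = 'A' then 'a' else ch)).splitOnP (· == 'a')) = mach f cs := by
        intro f; simpa [List.splitOn] using ih f
      rw [List.map_cons, this, List.splitOn, List.splitOnP_cons]
      cases f <;> simp [bAlt, mach, hc, PySem.Chars.upper, ih']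
    · rw [not_or] at hc
      have hsub : (if c = 'A' then 'a' else c) = c := by simp [hc.2]
      rw [List.map_cons, hsub, List.splitOn, List.splitOnP_cons,
        if_neg (by simp [hc.1])]
      rcases h0 : (cs.map (fun ch => if ch = 'A' then 'a' else ch)).splitOnP (· == 'a') with _ | ⟨s0, rest⟩
      · exact absurd h0 (List.splitOnP_ne_nil _ _)
      · have := ih f
        rw [List.splitOn, h0] at this
        cases f <;>
          simp_all [bAlt, mach, hc.1, hc.2, PySem.Chars.upper, List.modifyHead]

theorem caps_lock_eq (text : String) : caps_lock text = caps_lock_alt text := by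
  unfold caps_lock caps_lock_alt
  cases h : text.toList with
  | nil =>
    simp only [PySem.List.enumerate]
    decide
  | cons c cs =>
    dsimp only
    rw [PySem.List.enumerate_cons, List.foldl_cons]
    have hstep : capsStep ([], false) (0, c) = ([c], false) := by
      by_cases hc : c ≠ 'a' ∧ c ≠ 'A' <;> simp [capsStep, hc]
    rw [hstep, lemmaA cs (0+1) [c] false (by omega)]
    rcases h0 : (cs.map (fun ch => if ch = 'A' then 'a' else ch)).splitOn 'a' with _ | ⟨s0, rest⟩
    · exact absurd h0 (by rw [List.splitOn]; exact List.splitOnP_ne_nil _ _)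
    · have hslice : PySem.List.slice (s0 :: rest) (some 1) none = rest := by
        simp [PySem.List.slice]
      rw [hslice, lemmaFold rest 1 _ (by omega)]
      have hb := lemmaB cs false
      rw [h0] at hb
      simp only [bAlt] at hb
      simp [PySem.List.pyGetD, PySem.List.pyGet?, PySem.List.pyIdx?]
      simp only [Bool.false_eq_true, if_neg (by decide : ¬False), Bool.not_false] at hb
      rw [← hb]

-- ===== VERDICT (by name: the statement is the Claim_ definition above) =====
theorem caps_lock_spec : Claim_equal_caps_lock := by
  intro text _
  unfold Spec_caps_lock
  exact caps_lock_eq text
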